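-- pv_equiv track=rewrite | github.com/danielpodrazka/dagster-document-intelligence | scripts/minify_instructions.py | compact_none_checks
-- ===== SOURCE A (Python) =====
-- def compact_none_checks(text: str) -> str:
--     """Shorten `x is not None` to `x!=None` and `x is None` to `x==None` in code blocks.
--
--     LLMs understand both forms equally well. Saves ~5 chars per occurrence.
--     """
--     in_code_block = False
--     lines: list[str] = []
--     for line in text.splitlines(keepends=True):
--         if line.strip().startswith("```"):
--             in_code_block = not in_code_block
--             lines.append(line)
--             continue
--
--         if in_code_block:
--             line = line.replace(" is not None", "!=None")
--             line = line.replace(" is None", "==None")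
--         lines.append(line)
--     return "".join(lines)
-- ===== SOURCE B (Python) =====
-- def compact_none_checks(text: str) -> str:
--     """Shorten `x is not None` to `x!=None` and `x is None` to `x==None` in code blocks.
--
--     Group-then-map: partition the lines into segments separated by ``` fence lines,
--     then rewrite only the odd-indexed segments (those inside a code block).
--     """
--     segments = [[]]
--     fences = []
--     for line in text.splitlines(keepends=True):
--         if line.strip().startswith("```"):
--             fences.append(line)
--             segments.append([])
--         else:
--             segments[-1].append(line)
--     out = []
--     for i, seg in enumerate(segments):
--         if i % 2 == 1:
--             seg = [l.replace(" is not None", "!=None").replace(" is None", "==None") for l in seg]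
--         out.append("".join(seg))
--         if i < len(fences):
--             out.append(fences[i])
--     return "".join(out)
-- ===== Notes on version B (the rewrite author's own statement) =====
-- stated objective: alternative
-- what changed: Replaces A's per-line boolean toggle with a group-then-map decomposition: one pass partitions the keepends-split lines into fence lines and the segments between them, then only odd-indexed segments (inside code blocks) are rewritten and everything is rejoined in order.
import Mathlib
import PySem

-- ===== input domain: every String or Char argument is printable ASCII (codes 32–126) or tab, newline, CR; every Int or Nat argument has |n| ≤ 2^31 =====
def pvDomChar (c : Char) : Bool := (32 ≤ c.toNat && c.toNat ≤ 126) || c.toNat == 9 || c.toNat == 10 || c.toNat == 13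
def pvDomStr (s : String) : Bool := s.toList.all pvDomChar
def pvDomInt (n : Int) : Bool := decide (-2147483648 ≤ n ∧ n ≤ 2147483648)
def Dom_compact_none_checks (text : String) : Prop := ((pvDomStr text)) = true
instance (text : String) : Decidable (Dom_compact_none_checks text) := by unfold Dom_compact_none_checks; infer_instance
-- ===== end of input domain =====

-- B replaces A's per-line in_code_block toggle by a group-then-map decomposition
-- (partition the lines at fence lines, rewrite only odd-indexed segments, rejoin);
-- objective: alternative (same O(n) cost, different structure).

-- Shared primitive: text.splitlines(keepends=True), exact on the Dom alphabet
-- (the only line terminators Dom admits are '\n', '\r' and '\r\n').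
def pvSplitKeep (cur : List Char) : List Char → List (List Char)
  | [] => if cur.isEmpty then [] else [cur.reverse]
  | '\n' :: rest => (cur.reverse ++ ['\n']) :: pvSplitKeep [] rest
  | '\r' :: '\n' :: rest => (cur.reverse ++ ['\r', '\n']) :: pvSplitKeep [] rest
  | '\r' :: rest => (cur.reverse ++ ['\r']) :: pvSplitKeep [] rest
  | c :: rest => pvSplitKeep (c :: cur) rest

-- line.strip().startswith("```")
def pvFence (l : List Char) : Bool :=
  PySem.Chars.startswith (PySem.Chars.strip l) "```".toList

-- line.replace(" is not None", "!=None").replace(" is None", "==None")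
def pvRepl (l : List Char) : List Char :=
  PySem.Chars.replace (PySem.Chars.replace l " is not None".toList "!=None".toList)
    " is None".toList "==None".toList

-- ===== PORT A =====
-- A's loop: boolean in_code_block threaded through the lines, result list appended line by line.
def pvALoop (inCode : Bool) : List (List Char) → List (List Char)
  | [] => []
  | line :: rest =>
    if pvFence line then line :: pvALoop (!inCode) rest
    else (if inCode then pvRepl line else line) :: pvALoop inCode rest

def compact_none_checks (text : String) : String :=
  String.mk (pvALoop false (pvSplitKeep [] text.toList)).flatten

-- ===== PORT B =====
-- Source B's first loop: partition the lines into (segments, fences); segments[0] precedes fences[0].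
def pvBSplit : List (List Char) → List (List (List Char)) × List (List Char)
  | [] => ([[]], [])
  | l :: rest =>
    let p := pvBSplit rest
    if pvFence l then ([] :: p.1, l :: p.2)
    else
      match p.1 with
      | [] => ([[l]], p.2)          -- unreachable: pvBSplit always returns a nonempty first component
      | s :: ss => ((l :: s) :: ss, p.2)

-- Source B's second loop: emit segment i (rewritten when i % 2 == 1), then fences[i] if it exists.
def pvAsm (i : Nat) : List (List (List Char)) → List (List Char) → List Char
  | [], _ => []
  | seg :: segs, fences =>
    (if i % 2 == 1 then seg.map pvRepl else seg).flatten ++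
      match fences with
      | [] => pvAsm (i + 1) segs []
      | f :: fs => f ++ pvAsm (i + 1) segs fs

def compact_none_checks_alt (text : String) : String :=
  String.mk (pvAsm 0 (pvBSplit (pvSplitKeep [] text.toList)).1
    (pvBSplit (pvSplitKeep [] text.toList)).2)

-- ===== PRECONDITION & SPEC =====
def Spec_compact_none_checks (text : String) (out : String) : Prop := out = compact_none_checks_alt text
instance (text : String) (out : String) : Decidable (Spec_compact_none_checks text out) := by unfold Spec_compact_none_checks; infer_instance

-- ===== CLAIM (what is proved, stated in full; the proofs are below) =====
def Claim_equal_compact_none_checks : Prop := ∀ (text : String), Dom_compact_none_checks text → Spec_compact_none_checks text (compact_none_checks text)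

-- ===== LEMMAS AND PROOFS =====

-- Boolean-parity version of pvAsm, used only in the proofs.
def pvAsmB (b : Bool) : List (List (List Char)) → List (List Char) → List Char
  | [], _ => []
  | seg :: segs, fences =>
    (if b then seg.map pvRepl else seg).flatten ++
      match fences with
      | [] => pvAsmB (!b) segs []
      | f :: fs => f ++ pvAsmB (!b) segs fs

lemma pvAsm_eq_asmB : ∀ (segs : List (List (List Char))) (fences : List (List Char)) (i : Nat),
    pvAsm i segs fences = pvAsmB (i % 2 == 1) segs fences := by
  intro segs
  induction segs with
  | nil => intro fences i; rfl
  | cons seg segs ih =>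
    intro fences i
    have hpar : ((i + 1) % 2 == 1) = !(i % 2 == 1) := by
      have h := Nat.mod_two_eq_zero_or_one i
      rcases h with h | h <;> simp [Nat.add_mod, h]
    cases fences with
    | nil => simp [pvAsm, pvAsmB, ih, hpar]
    | cons f fs => simp [pvAsm, pvAsmB, ih, hpar]

lemma pvBSplit_fst_ne_nil : ∀ (ls : List (List Char)), (pvBSplit ls).1 ≠ [] := by
  intro ls
  induction ls with
  | nil => simp [pvBSplit]
  | cons l rest ih =>
    simp only [pvBSplit]
    cases h : pvBSplit rest with
    | mk segs fs =>
      by_cases hf : pvFence l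
      · simp [hf]
      · cases segs with
        | nil => simp [hf]
        | cons s ss => simp [hf]

lemma pvMain : ∀ (ls : List (List Char)) (b : Bool),
    (pvALoop b ls).flatten = pvAsmB b (pvBSplit ls).1 (pvBSplit ls).2 := by
  intro ls
  induction ls with
  | nil => intro b; cases b <;> rfl
  | cons l rest ih =>
    intro b
    by_cases hf : pvFence l
    · simp only [pvALoop, pvBSplit, hf, if_pos, List.flatten_cons]
      cases b <;> simp [pvAsmB, ih]
    · have hne := pvBSplit_fst_ne_nil rest
      cases hsp : pvBSplit rest with
      | mk segs fs =>
        cases segs with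
        | nil => exact absurd (by simp [hsp]) hne
        | cons s ss =>
          have ih' := ih b
          rw [hsp] at ih'
          simp only [pvALoop, pvBSplit, hf, if_neg, List.flatten_cons, hsp]
          cases fs with
          | nil => cases b <;> simp [pvAsmB] at ih' ⊢ <;> simp [ih']
          | cons f ffs => cases b <;> simp [pvAsmB] at ih' ⊢ <;> simp [ih']

-- ===== VERDICT (by name: the statement is the Claim_ definition above) =====
theorem compact_none_checks_spec : Claim_equal_compact_none_checks := by
  intro text _
  unfold Spec_compact_none_checks compact_none_checks compact_none_checks_alt
  have h := pvMain (pvSplitKeep [] text.toList) false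
  have h0 : (0 % 2 == 1) = false := rfl
  rw [pvAsm_eq_asmB, h0, h]
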